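-- pv_equiv track=rewrite | github.com/MingdiXie/Huffmantree | huffman.py | len_sort
-- ===== SOURCE A (Python) =====
-- def len_sort(lst):
--     dic = {}
--     res = []
--     for i in lst:
--         dic.setdefault(len(i),[]).append(i)
--     length = sorted(list(dic.keys()))
--     for j in length:
--         res.extend(dic[j])
--     return res
-- ===== SOURCE B (Python) =====
-- def len_sort(lst):
--     return sorted(lst, key=len)
-- ===== Notes on version B (the rewrite author's own statement) =====
-- stated objective: idiomatic
-- what changed: Replaces the length-keyed bucket dict plus key-sorting-and-concatenation loop with a single stable comparison sort, sorted(lst, key=len), relying on sort stability for ties.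
import Mathlib
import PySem

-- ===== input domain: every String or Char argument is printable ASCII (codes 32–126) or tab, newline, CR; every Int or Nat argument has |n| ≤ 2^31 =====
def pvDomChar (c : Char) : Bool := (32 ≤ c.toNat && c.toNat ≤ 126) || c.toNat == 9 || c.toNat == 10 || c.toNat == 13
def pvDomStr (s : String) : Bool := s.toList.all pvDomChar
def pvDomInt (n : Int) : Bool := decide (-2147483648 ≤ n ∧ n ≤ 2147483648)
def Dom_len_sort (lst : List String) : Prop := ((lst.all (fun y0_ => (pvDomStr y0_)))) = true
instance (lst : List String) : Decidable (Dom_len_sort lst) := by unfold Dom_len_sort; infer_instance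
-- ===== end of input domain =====

-- B replaces A's length-keyed bucket table (dict build, key sort, extend loop) by a single
-- stable comparison sort keyed by length: sorted(lst, key=len). Same result; objective: idiomatic.

-- ===== PORT A =====
def len_sort (lst : List String) : List String :=
  -- for i in lst: dic.setdefault(len(i),[]).append(i)  ==  dic[len(i)] = dic.get(len(i), []) + [i]
  let dic := lst.foldl (fun d i => d.modify (PySem.Str.len i) [] (fun b => b ++ [i])) PySem.Dict.empty
  let length := PySem.List.sorted dic.keys (fun x => x)
  -- dic[j] never raises here: j comes from dic.keys
  length.foldl (fun res j => res ++ (dic.get? j).getD []) []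

-- ===== PORT B =====
def len_sort_alt (lst : List String) : List String :=
  PySem.List.sorted lst (fun i => PySem.Str.len i)

-- ===== PRECONDITION & SPEC =====
def Spec_len_sort (lst : List String) (out : List String) : Prop := out = len_sort_alt lst
instance (lst : List String) (out : List String) : Decidable (Spec_len_sort lst out) := by unfold Spec_len_sort; infer_instance

-- ===== CLAIM (what is proved, stated in full; the proofs are below) =====
def Claim_equal_len_sort : Prop := ∀ (lst : List String), Dom_len_sort lst → Spec_len_sort lst (len_sort lst)

-- ===== LEMMAS AND PROOFS =====

-- the common normal form: strictly increasing distinct lengths, each expanded to its bucket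
def flatForm (lst : List String) : List String :=
  (PySem.List.sorted (PySem.Set.ofList (lst.map (fun s => PySem.Str.len s))) (fun k => k)).flatMap
    (fun k => lst.filter (fun s => PySem.Str.len s == k))

lemma insertBy_skip {α : Type} (bef : α → α → Bool) (x : α) (ys zs : List α)
    (h : ∀ y ∈ ys, bef x y = false) :
    PySem.List.insertBy bef x (ys ++ zs) = ys ++ PySem.List.insertBy bef x zs := by
  induction ys with
  | nil => simp
  | cons y ys ih =>
    simp only [List.cons_append, PySem.List.insertBy, h y (by simp)]
    simp only [Bool.false_eq_true, if_false, List.cons.injEq, true_and]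
    exact ih (fun y hy => h y (by simp [hy]))

lemma insertBy_front {α : Type} (bef : α → α → Bool) (x : α) (zs : List α)
    (h : ∀ y ∈ zs, bef x y = true) :
    PySem.List.insertBy bef x zs = x :: zs := by
  cases zs with
  | nil => rfl
  | cons z zs => simp [PySem.List.insertBy, h z (by simp)]

def insInt (k : Int) : List Int → List Int
  | [] => [k]
  | j :: r => if k < j then k :: j :: r else j :: insInt k r

lemma insInt_perm (k : Int) : ∀ K : List Int, (insInt k K).Perm (K ++ [k]) := by
  intro K
  induction K with
  | nil => simp [insInt]
  | cons j r ih =>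
    by_cases h : k < j
    · simpa [insInt, h] using (List.perm_append_singleton k (j :: r)).symm
    · simpa [insInt, h] using ih.cons j

lemma mem_insInt {m k : Int} {K : List Int} (h : m ∈ insInt k K) : m = k ∨ m ∈ K := by
  have := ((insInt_perm k K).mem_iff).mp h
  simp at this
  tauto

lemma insInt_pairwise (k : Int) : ∀ K : List Int, K.Pairwise (· < ·) → k ∉ K →
    (insInt k K).Pairwise (· < ·) := by
  intro K
  induction K with
  | nil => intro _ _; simp [insInt]
  | cons j r ih =>
    intro hp hk
    rcases List.pairwise_cons.mp hp with ⟨hj, hr⟩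
    by_cases h : k < j
    · simp only [insInt, if_pos h]
      refine List.pairwise_cons.mpr ⟨?_, hp⟩
      intro m hm
      rcases List.mem_cons.mp hm with rfl | h'
      · exact h
      · exact lt_trans h (hj m h')
    · have hkj : j < k := by
        rcases lt_or_eq_of_le (not_lt.mp h) with h' | h'
        · exact h'
        · exact absurd h'.symm (fun he => hk (by simp [he]))
      simp only [insInt, if_neg h]
      refine List.pairwise_cons.mpr ⟨?_, ih hr (fun hm => hk (by simp [hm]))⟩
      intro m hm
      rcases mem_insInt hm with rfl | h'
      · exact hkj
      · exact hj m h'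

lemma insertBy_flat_mem (key : String → Int) (x : String) :
    ∀ (K : List Int) (f : Int → List String),
      K.Pairwise (· < ·) →
      (∀ k ∈ K, ∀ y ∈ f k, key y = k) →
      key x ∈ K →
      PySem.List.insertBy (fun a b => decide (key a < key b)) x (K.flatMap f)
        = K.flatMap (fun k => f k ++ if key x = k then [x] else []) := by
  intro K
  induction K with
  | nil => intro f _ _ hx; simp at hx
  | cons j rest ih =>
    intro f hp hf hx
    rcases List.pairwise_cons.mp hp with ⟨hj, hrest⟩
    simp only [List.flatMap_cons]
    by_cases hkj : key x = j
    · -- x joins bucket j: skip f j, insert in front of the rest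
      rw [insertBy_skip _ _ _ _ (fun y hy => by
        have := hf j (by simp) y hy
        simp [this, hkj])]
      rw [insertBy_front _ _ _ (fun y hy => by
        rcases List.mem_flatMap.mp hy with ⟨k, hk, hyk⟩
        have h1 := hf k (by simp [hk]) y hyk
        have h2 := hj k hk
        simp [h1, hkj]; omega)]
      have hrec : rest.flatMap (fun k => f k ++ if key x = k then [x] else [])
          = rest.flatMap f := by
        apply List.flatMap_congr
        intro k hk
        have : key x ≠ k := by have := hj k hk; omega
        simp [this]
      rw [hrec]
      simp [hkj]
    · -- x belongs further right
      have hxr : key x ∈ rest := by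
        rcases List.mem_cons.mp hx with h | h
        · exact absurd h hkj
        · exact h
      rw [insertBy_skip _ _ _ _ (fun y hy => by
        have h1 := hf j (by simp) y hy
        have h2 := hj _ hxr
        simp [h1]; omega)]
      rw [ih f hrest (fun k hk => hf k (by simp [hk])) hxr]
      simp [hkj]

lemma insertBy_flat_new (key : String → Int) (x : String) :
    ∀ (K : List Int) (f : Int → List String),
      K.Pairwise (· < ·) →
      (∀ k ∈ K, ∀ y ∈ f k, key y = k) →
      key x ∉ K → f (key x) = [] →
      PySem.List.insertBy (fun a b => decide (key a < key b)) x (K.flatMap f)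
        = (insInt (key x) K).flatMap (fun k => f k ++ if key x = k then [x] else []) := by
  intro K
  induction K with
  | nil => intro f _ _ _ hfx; simp [insInt, PySem.List.insertBy, hfx]
  | cons j rest ih =>
    intro f hp hf hx hfx
    rcases List.pairwise_cons.mp hp with ⟨hj, hrest⟩
    have hne : key x ≠ j := fun h => hx (by simp [h])
    by_cases h : key x < j
    · rw [insertBy_front _ _ _ (fun y hy => by
        rcases List.mem_flatMap.mp hy with ⟨k, hk, hyk⟩
        have h1 := hf k hk y hyk
        have h2 : j ≤ k := by
          rcases List.mem_cons.mp hk with rfl | hk'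
          · exact le_refl _
          · exact le_of_lt (hj k hk')
        simp [h1]; omega)]
      have hrec : (j :: rest).flatMap (fun k => f k ++ if key x = k then [x] else [])
          = (j :: rest).flatMap f := by
        apply List.flatMap_congr
        intro k hk
        have hle : j ≤ k := by
          rcases List.mem_cons.mp hk with rfl | hk'
          · exact le_refl _
          · exact le_of_lt (hj _ hk')
        have : key x ≠ k := by omega
        simp [this]
      simp only [insInt, if_pos h, List.flatMap_cons, hfx, List.nil_append, hrec]
      simp
    · have hjx : j < key x := by omega
      simp only [List.flatMap_cons]
      rw [insertBy_skip _ _ _ _ (fun y hy => by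
        have h1 := hf j (by simp) y hy
        simp [h1]; omega)]
      rw [ih f hrest (fun k hk => hf k (by simp [hk])) (fun hm => hx (by simp [hm])) hfx]
      simp [insInt, if_neg h, hne]

lemma sorted_eq_flatForm (lst : List String) :
    PySem.List.sorted lst (fun i => PySem.Str.len i) = flatForm lst := by
  induction lst using List.reverseRecOn with
  | nil => rfl
  | append_singleton xs x ih =>
    have hstep : PySem.List.sorted (xs ++ [x]) (fun i => PySem.Str.len i)
        = PySem.List.insertBy (fun a b => decide (PySem.Str.len a < PySem.Str.len b)) x
            (PySem.List.sorted xs (fun i => PySem.Str.len i)) := by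
      rw [PySem.List.sorted_eq_foldl_insertBy, List.foldl_append,
          ← PySem.List.sorted_eq_foldl_insertBy]
      rfl
    rw [hstep, ih]
    unfold flatForm
    have hK : (PySem.List.sorted (PySem.Set.ofList (xs.map fun s => PySem.Str.len s))
        (fun k => k)).Pairwise (· < ·) := PySem.List.sorted_ofList_pairwise_lt _
    have hf : ∀ k ∈ PySem.List.sorted (PySem.Set.ofList (xs.map fun s => PySem.Str.len s))
        (fun k => k), ∀ y ∈ xs.filter (fun s => PySem.Str.len s == k), PySem.Str.len y = k := by
      intro k _ y hy
      simpa using (List.mem_filter.mp hy).2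
    have hbucket : ∀ k : Int, (xs ++ [x]).filter (fun s => PySem.Str.len s == k)
        = xs.filter (fun s => PySem.Str.len s == k)
          ++ (if PySem.Str.len x = k then [x] else []) := by
      intro k
      rw [List.filter_append]
      congr 1
      simp [List.filter_singleton]
    have hmap : (xs ++ [x]).map (fun s => PySem.Str.len s)
        = xs.map (fun s => PySem.Str.len s) ++ [PySem.Str.len x] := by simp
    by_cases hmem : PySem.Str.len x ∈ xs.map (fun s => PySem.Str.len s)
    · have hS : PySem.Set.ofList ((xs ++ [x]).map fun s => PySem.Str.len s)
          = PySem.Set.ofList (xs.map fun s => PySem.Str.len s) := by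
        rw [hmap, PySem.Set.ofList_append_singleton]
        exact PySem.Set.add_of_mem ((PySem.Set.mem_ofList _ _).mpr hmem)
      rw [hS]
      have hx : PySem.Str.len x ∈ PySem.List.sorted
          (PySem.Set.ofList (xs.map fun s => PySem.Str.len s)) (fun k => k) :=
        (PySem.List.mem_sorted _ _ _ _).mpr ((PySem.Set.mem_ofList _ _).mpr hmem)
      rw [insertBy_flat_mem (fun s => PySem.Str.len s) x _ _ hK hf hx]
      apply List.flatMap_congr
      intro k _
      rw [hbucket k]
    · have hxK : PySem.Str.len x ∉ PySem.List.sorted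
          (PySem.Set.ofList (xs.map fun s => PySem.Str.len s)) (fun k => k) := fun h =>
        hmem ((PySem.Set.mem_ofList _ _).mp ((PySem.List.mem_sorted _ _ _ _).mp h))
      have hS : PySem.Set.ofList ((xs ++ [x]).map fun s => PySem.Str.len s)
          = PySem.Set.ofList (xs.map fun s => PySem.Str.len s) ++ [PySem.Str.len x] := by
        rw [hmap, PySem.Set.ofList_append_singleton]
        exact PySem.Set.add_of_not_mem (fun h => hmem ((PySem.Set.mem_ofList _ _).mp h))
      rw [hS]
      have hK' : PySem.List.sorted
          (PySem.Set.ofList (xs.map fun s => PySem.Str.len s) ++ [PySem.Str.len x])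
          (fun k => k)
          = insInt (PySem.Str.len x)
              (PySem.List.sorted (PySem.Set.ofList (xs.map fun s => PySem.Str.len s))
                (fun k => k)) := by
        apply PySem.List.sorted_eq_of_perm_of_pairwise_lt
        · exact (insInt_perm _ _).trans
            ((PySem.List.sorted_perm _ _ _).append_right [PySem.Str.len x])
        · exact insInt_pairwise _ _ hK hxK
      rw [hK']
      have hfx : xs.filter (fun s => PySem.Str.len s == PySem.Str.len x) = [] := by
        apply List.filter_eq_nil_iff.mpr
        intro s hs
        simp only [beq_iff_eq]
        intro h
        exact hmem (h ▸ List.mem_map_of_mem hs)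
      rw [insertBy_flat_new (fun s => PySem.Str.len s) x _ _ hK hf hxK hfx]
      apply List.flatMap_congr
      intro k _
      rw [hbucket k]

lemma len_sort_eq_flatForm (lst : List String) : len_sort lst = flatForm lst := by
  unfold len_sort flatForm
  have hpairs : lst.foldl
      (fun d i => d.modify (PySem.Str.len i) [] (fun b => b ++ [i])) PySem.Dict.empty
      = (lst.map (fun i => (PySem.Str.len i, i))).foldl
          (fun d p => d.modify p.1 [] (fun b => b ++ [p.2])) PySem.Dict.empty := by
    rw [List.foldl_map]
  have hkeys : (lst.foldl
      (fun d i => d.modify (PySem.Str.len i) [] (fun b => b ++ [i])) PySem.Dict.empty).keys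
      = PySem.Set.ofList (lst.map fun s => PySem.Str.len s) := by
    rw [PySem.Dict.keys_foldl_modify_key lst (fun s => PySem.Str.len s) []
      (fun _ i => fun b => b ++ [i]) PySem.Dict.empty]
    simp [PySem.Dict.keys, PySem.Dict.empty, PySem.Set.update_nil_left]
  rw [PySem.List.foldl_append_eq_flatMap, List.nil_append, hkeys]
  apply List.flatMap_congr
  intro k _
  rw [← PySem.Dict.getD_eq_get?_getD, hpairs,
    PySem.Dict.getD_foldl_modify_append, List.filter_map, List.map_map]
  simp [Function.comp_def]

-- ===== VERDICT (by name: the statement is the Claim_ definition above) =====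
theorem len_sort_spec : Claim_equal_len_sort := by
  intro lst _
  show len_sort lst = len_sort_alt lst
  rw [len_sort_eq_flatForm, len_sort_alt, sorted_eq_flatForm]
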